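/- GENERATED by mk_final_copies.py from the proof of the farm's unit `codebook_decode_deinterleave_repeat.4` (farm:codebook_decode_deinterleave_repeat.4.2: Lemmas.lean) as the
   re-elaboration sweep compiled it — do not edit. -/
import Asan.CheckWalk
import Vorbis.Spec.Units.codebook_decode_deinterleave_repeat_4

open X86 X86.User Asan Vorbis Vorbis.Spec Vorbis.Spec.Deint

namespace Vorbis.Spec.codebook_decode_deinterleave_repeat_4

/-- **The invariant of loop 1946 at its head 10DD70H** (`for (i=0; i < effective; ++i)`, the non-sequence arm): what every
cut point shares (`Common`), the local copies of the position (`Locals`: ebp = c_inter, `[rsp+8]` = p_inter, r15d = effective,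
`[rsp+78H]` = total_decode), `[rsp+4]` = z·dimensions, r13d = `i`, and the arithmetic invariant `Res.DeintInner`
(`p_inter·ch + c_inter = pos0 + i`, the whole round fits). -/
structure LoopInv (others : List Obj) (frames : List (Nat × FrameLayout)) (Blk : Block → Prop) (len : Nat) (u₀ : State)
    (ret : Word) (e : State) (eff zd : Nat) (td : Int) (pos0 ci pi i : Nat) (v : State) : Prop where
  common : Common others frames Blk len u₀ ret e v
  locals : Locals e v ci pi eff td
  zdSlot : v.mem.readLE (e.reg .rsp - 100) 4 = zd
  iReg : v.reg .r13 = UInt64.ofNat i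
  inner : Res.DeintInner ci pi (chOf e) (lenOf e) pos0 eff i

/-- **A window of memory that a store of this segment may hit without disturbing anything `Common` speaks of** (entry state
`e`): it lies inside the contract's footprint, and misses `*f`, the struct at `c`, the `sorted_values` block, the table of
output pointers, the two ints, the slots `[rsp+0CH .. rsp+80H)` of the frame (ch, outputs, f, the two pointers, the saved
registers, the return address, `len`, `total_decode`), the image's text and the shadow. -/
structure WinOff (others : List Obj) (frames : List (Nat × FrameLayout)) (Blk : Block → Prop) (len : Nat) (e : State)
    (w : Span) : Prop where
  foot : ∃ w', w' ∈ (codebook_decode_deinterleave_repeat.spec others frames Blk len).footprint e ∧ w'.lo ≤ w.lo ∧ w.hi ≤ w'.hi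
  obj : w.hi ≤ fOf e ∨ fOf e + 1808 ≤ w.lo
  book : cOf e + 2120 ≤ w.lo ∨ w.hi ≤ cOf e
  sv : 1 ≤ Codebook.sorted_entries e.mem (cOf e) →
    (Codebook.svBlock e.mem (cOf e)).base + (Codebook.svBlock e.mem (cOf e)).size ≤ w.lo ∨
      w.hi ≤ (Codebook.svBlock e.mem (cOf e)).base
  table : outsOf e + 8 * chOf e ≤ w.lo ∨ w.hi ≤ outsOf e
  cp : cpOf e + 4 ≤ w.lo ∨ w.hi ≤ cpOf e
  pp : ppOf e + 4 ≤ w.lo ∨ w.hi ≤ ppOf e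
  slots : w.hi ≤ (e.reg .rsp).toNat - 92 ∨ (e.reg .rsp).toNat + 24 ≤ w.lo
  text : w.hi ≤ 0x100000 ∨ 0x119d40 ≤ w.lo
  shadow : w.hi ≤ 0xC00000 ∨ 0xE00000 ≤ w.lo

/-- `Codebook.SameFields` composes. -/
theorem sameFields_trans {m1 m2 m3 : Mem} {c : Nat} (h1 : Codebook.SameFields m1 m2 c)
    (h2 : Codebook.SameFields m2 m3 c) : Codebook.SameFields m1 m3 c := by
  constructor
  · exact h2.dimensions.trans h1.dimensions
  · exact h2.entries.trans h1.entries
  · exact h2.codeword_lengths.trans h1.codeword_lengths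
  · exact h2.minimum_value.trans h1.minimum_value
  · exact h2.delta_value.trans h1.delta_value
  · exact h2.value_bits.trans h1.value_bits
  · exact h2.lookup_type.trans h1.lookup_type
  · exact h2.sequence_p.trans h1.sequence_p
  · exact h2.sparse.trans h1.sparse
  · exact h2.lookup_values.trans h1.lookup_values
  · exact h2.multiplicands.trans h1.multiplicands
  · exact h2.codewords.trans h1.codewords
  · intro k hk
    exact (h2.fast_huffman k hk).trans (h1.fast_huffman k hk)
  · exact h2.sorted_codewords.trans h1.sorted_codewords
  · exact h2.sorted_values.trans h1.sorted_values
  · exact h2.sorted_entries.trans h1.sorted_entries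

/-- **Where everything `Common` speaks of lies**, as arithmetic over the entry state `e` (one fact per object, for `omega`): above
the text, inside the data space, off the stack below the caller's stack pointer BEFORE it pushed the two arguments
(`e.rsp + 24`: `DeintPre.args`). -/
structure DeintEnv (e : State) : Prop where
  top : (e.reg .rsp).toNat + 24 ≤ 0x800000
  f : 0x119d40 ≤ fOf e ∧ fOf e + 1808 ≤ 0xC00000 ∧
    ((e.reg .rsp).toNat + 24 ≤ fOf e ∨ fOf e + 1808 ≤ 0x700000 ∨ 0x800000 ≤ fOf e)
  c : 0x119d40 ≤ cOf e ∧ cOf e + 2120 ≤ 0xC00000 ∧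
    ((e.reg .rsp).toNat + 24 ≤ cOf e ∨ cOf e + 2120 ≤ 0x700000 ∨ 0x800000 ≤ cOf e)
  sv : 1 ≤ Codebook.sorted_entries e.mem (cOf e) →
    0x119d40 ≤ (Codebook.svBlock e.mem (cOf e)).base ∧
    (Codebook.svBlock e.mem (cOf e)).base + (Codebook.svBlock e.mem (cOf e)).size ≤ 0xC00000 ∧
    ((e.reg .rsp).toNat + 24 ≤ (Codebook.svBlock e.mem (cOf e)).base ∨
      (Codebook.svBlock e.mem (cOf e)).base + (Codebook.svBlock e.mem (cOf e)).size ≤ 0x700000 ∨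
      0x800000 ≤ (Codebook.svBlock e.mem (cOf e)).base)
  table : 0x119d40 ≤ outsOf e ∧ outsOf e + 8 * chOf e ≤ 0xC00000 ∧
    ((e.reg .rsp).toNat + 24 ≤ outsOf e ∨ outsOf e + 8 * chOf e ≤ 0x700000 ∨ 0x800000 ≤ outsOf e)
  cp : 0x119d40 ≤ cpOf e ∧ cpOf e + 4 ≤ 0xC00000 ∧
    ((e.reg .rsp).toNat + 24 ≤ cpOf e ∨ cpOf e + 4 ≤ 0x700000 ∨ 0x800000 ≤ cpOf e)
  pp : 0x119d40 ≤ ppOf e ∧ ppOf e + 4 ≤ 0xC00000 ∧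
    ((e.reg .rsp).toNat + 24 ≤ ppOf e ∨ ppOf e + 4 ≤ 0x700000 ∨ 0x800000 ≤ ppOf e)

/-- The precondition gives `DeintEnv` (`he_room`: the function has stack room, so `700000H < e.rsp + 24`). -/
theorem env_of_pre {others : List Obj} {frames : List (Nat × FrameLayout)} {Blk : Block → Prop} {len : Nat} {e : State}
    (hpre : DeintPre others frames Blk len e) (he_room : 0x700000 + 496 ≤ (e.reg .rsp).toNat) : DeintEnv e := by
  have hargs := hpre.args
  have hoff := hpre.book.reader.shadow.offText
  have hL := hpre.book.reader.env.live
  have htop : 0x700000 < (e.reg .rsp).toNat + 24 := by omega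
  have eT : L.textHi = 0x119d40 := rfl
  refine ⟨hargs.stack.hi, ?_, ?_, ?_, ?_, ?_, ?_⟩
  · have hw := hpre.book.reader.env.obj.where_ hargs hoff (by decide)
    simp only [Off.sizeof.stb_vorbis] at hw
    exact hw
  · obtain ⟨B, hB, hin⟩ := hpre.book.book
    have hs : Site (Live (stackObjs frames ++ others)) (cOf e) 2120 :=
      Site.of_blk hL hB hin.1 hin.2 (by decide)
    have hw := site_where hargs hoff htop hs
    rw [eT] at hw
    exact hw
  · intro hse
    have hB := hpre.book.cb.K4.sv hse
    have hw := blk_where hL hargs hoff htop hB (by simp only []; omega)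
    rw [eT] at hw
    exact hw
  · have hch := hpre.ch_pos
    have hw := site_where hargs hoff htop hpre.table
    rw [eT] at hw
    exact hw
  · have hw := site_where hargs hoff htop hpre.cpSite
    rw [eT] at hw
    exact hw
  · have hw := site_where hargs hoff htop hpre.ppSite
    rw [eT] at hw
    exact hw

/-- **A store into the function's own frame below the slot of `ch`** (`[rsp+8]` = p_inter; the return address of a check call
at `[rsp−8]`) is `WinOff`. -/
theorem off_stack {others : List Obj} {frames : List (Nat × FrameLayout)} {Blk : Block → Prop} {len : Nat} {e : State}
    (henv : DeintEnv e) (he_room : 0x700000 + 496 ≤ (e.reg .rsp).toNat) (w : Span)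
    (h1 : (e.reg .rsp).toNat - 496 ≤ w.lo) (h2 : w.hi ≤ (e.reg .rsp).toNat - 92) : WinOff others frames Blk len e w := by
  have htop := henv.top
  refine ⟨⟨⟨(e.reg .rsp).toNat - 496, (e.reg .rsp).toNat⟩, ?_, ?_, ?_⟩, ?_, ?_, ?_, ?_, ?_, ?_, ?_, ?_, ?_⟩
  · simp only [X86.User.Spec.footprint, vspec]
    exact List.mem_cons_self
  · exact h1
  · simp only []
    omega
  · have := henv.f
    omega
  · have := henv.c
    omega
  · intro hse
    have := henv.sv hse
    generalize (Codebook.svBlock e.mem (cOf e)).base = b at *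
    generalize (Codebook.svBlock e.mem (cOf e)).size = n at *
    omega
  · have := henv.table
    omega
  · have := henv.cp
    omega
  · have := henv.pp
    omega
  · omega
  · omega
  · omega

/-- **The float `outputs[k][p]`** (`k < ch`, `p < len`, `outputs[k] ≠ NULL`) is a check site: `DeintPre.outs` gives an allocated
block of at least `4·len` bytes at the pointer found in the table at entry. -/
theorem float_site {others : List Obj} {frames : List (Nat × FrameLayout)} {Blk : Block → Prop} {len : Nat} {e : State}
    (hpre : DeintPre others frames Blk len e) (k p : Nat) (hk : k < chOf e) (hp : p < lenOf e)
    (hnz : e.mem.ptr (outsOf e + 8 * k) ≠ 0) :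
    Site (Live (stackObjs frames ++ others)) (e.mem.ptr (outsOf e + 8 * k) + 4 * p) 4 := by
  have hL := hpre.book.reader.env.live
  have houts : e.mem.ptr (outsOf e + 8 * k) = 0 ∨
      ∃ sz, 4 * lenOf e ≤ sz ∧ Blk ⟨e.mem.ptr (outsOf e + 8 * k), sz⟩ := hpre.outs k hk
  rcases houts with h0 | ⟨sz, hsz, hB⟩
  · exact absurd h0 hnz
  · refine Site.of_blk hL hB ?_ ?_ (by decide)
    · simp only []
      omega
    · simp only []
      omega

/-- Where the float `outputs[k][p]` is: above the text, in the data space, off the stack below `e.rsp + 24`. -/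
theorem float_where {others : List Obj} {frames : List (Nat × FrameLayout)} {Blk : Block → Prop} {len : Nat} {e : State}
    (hpre : DeintPre others frames Blk len e) (he_room : 0x700000 + 496 ≤ (e.reg .rsp).toNat) (k p : Nat)
    (hk : k < chOf e) (hp : p < lenOf e) (hnz : e.mem.ptr (outsOf e + 8 * k) ≠ 0) :
    0x119d40 ≤ e.mem.ptr (outsOf e + 8 * k) + 4 * p ∧ e.mem.ptr (outsOf e + 8 * k) + 4 * p + 4 ≤ 0xC00000 ∧
      ((e.reg .rsp).toNat + 24 ≤ e.mem.ptr (outsOf e + 8 * k) + 4 * p ∨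
        e.mem.ptr (outsOf e + 8 * k) + 4 * p + 4 ≤ 0x700000 ∨ 0x800000 ≤ e.mem.ptr (outsOf e + 8 * k) + 4 * p) := by
  have hs := float_site hpre k p hk hp hnz
  have hw := site_where hpre.args hpre.book.reader.shadow.offText (by omega) hs
  have eT : L.textHi = 0x119d40 := rfl
  rw [eT] at hw
  exact hw

/-- **The store into `outputs[k][p]`** is `WinOff`: inside the window `outputs[k][0 .. len)` of the footprint; `DeintApart` keeps
that window away from `*f`, the struct at `c`, the `sorted_values` block, the table and the two ints; a live range is off the
frame, the text and the shadow. -/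
theorem off_float {others : List Obj} {frames : List (Nat × FrameLayout)} {Blk : Block → Prop} {len : Nat} {e : State}
    (hpre : DeintPre others frames Blk len e) (he_room : 0x700000 + 496 ≤ (e.reg .rsp).toNat) (k p : Nat)
    (hk : k < chOf e) (hp : p < lenOf e) (hnz : e.mem.ptr (outsOf e + 8 * k) ≠ 0) :
    WinOff others frames Blk len e
      ⟨e.mem.ptr (outsOf e + 8 * k) + 4 * p, e.mem.ptr (outsOf e + 8 * k) + 4 * p + 4⟩ := by
  have hw := float_where hpre he_room k p hk hp hnz
  have hap : DeintApart e.mem (fOf e) (cOf e) (outsOf e) (chOf e) (cpOf e) (ppOf e) (lenOf e) := hpre.apart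
  have htop := hpre.args.stack.hi
  have hwin : deint.window e.mem (outsOf e) (lenOf e) k = ⟨e.mem.ptr (outsOf e + 8 * k), 4 * lenOf e⟩ := rfl
  generalize hP : e.mem.ptr (outsOf e + 8 * k) = P at *
  refine ⟨⟨⟨P, P + 4 * lenOf e⟩, ?_, ?_, ?_⟩, ?_, ?_, ?_, ?_, ?_, ?_, ?_, ?_, ?_⟩
  · simp only [X86.User.Spec.footprint, vspec, deint.wins]
    apply List.mem_cons_of_mem
    apply List.mem_append_right
    apply List.mem_map.mpr
    refine ⟨k, List.mem_filter.mpr ⟨List.mem_range.mpr hk, decide_eq_true (fun h0 => hnz (hP.symm.trans h0))⟩, ?_⟩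
    rw [hwin]
    rfl
  · simp only []
    omega
  · simp only []
    omega
  · have hd := hap.winObj k hk (by rw [hP]; exact hnz)
    rw [hwin] at hd
    simp only [vblock, Off.sizeof.stb_vorbis] at hd
    simp only []
    omega
  · have hd := hap.winBook k hk (by rw [hP]; exact hnz)
    rw [hwin] at hd
    simp only [vblock, Off.sizeof.Codebook] at hd
    simp only []
    omega
  · intro hse
    have hd := hap.winSv k hk (by rw [hP]; exact hnz) hse
    rw [hwin] at hd
    generalize Codebook.svBlock e.mem (cOf e) = SV at *
    simp only [Block.disjoint] at hd
    simp only []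
    omega
  · have hd := hap.winTable k hk (by rw [hP]; exact hnz)
    rw [hwin] at hd
    simp only [vblock] at hd
    simp only []
    omega
  · have hd := hap.winCp k hk (by rw [hP]; exact hnz)
    rw [hwin] at hd
    simp only [vblock] at hd
    simp only []
    omega
  · have hd := hap.winPp k hk (by rw [hP]; exact hnz)
    rw [hwin] at hd
    simp only [vblock] at hd
    simp only []
    omega
  · simp only []
    omega
  · simp only []
    omega
  · simp only []
    omega

/-- **A slot of the frame between `[rsp+0CH]` and the end of the argument slots reads the same** after stores that are `WinOff`. -/
theorem slot_frame {m m' : Mem} {ws : List Span} (hs : Mem.SameExcept ws m m') (sp : Nat) (htop : sp + 24 ≤ 0x800000)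
    (hW : ∀ w, w ∈ ws → w.hi ≤ sp - 92 ∨ sp + 24 ≤ w.lo) (a : Word) (k : Nat) (h1 : sp - 92 ≤ a.toNat)
    (h2 : a.toNat + k ≤ sp + 24) : m'.readLE a k = m.readLE a k := by
  apply hs.readLE a k (by omega)
  intro w hw
  have := hW w hw
  omega

/-- **`Common` AFTER STORES THAT ARE `WinOff`** (the float read-modify-write into `outputs[c_inter][p_inter]`, `++p_inter` in its
slot, the return address of a check call): the state `v'` has the steady stack pointer, r12 = c, DF = 0 and the MXCSR masks, and
its memory differs from that of `v` only inside windows that are `WinOff`. -/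
theorem common_frame {others : List Obj} {frames : List (Nat × FrameLayout)} {Blk : Block → Prop} {len : Nat} {u₀ : State}
    {ret : Word} {e v v' : State} (h : Common others frames Blk len u₀ ret e v) (henv : DeintEnv e)
    (he_room : 0x700000 + 496 ≤ (e.reg .rsp).toNat) {ws : List Span} (hs : Mem.SameExcept ws v.mem v'.mem)
    (hW : ∀ w, w ∈ ws → WinOff others frames Blk len e w) (hrsp : v'.reg .rsp = e.reg .rsp - 104)
    (hr12 : v'.reg .r12 = e.reg .rsi) (habi : abiInv v') : Common others frames Blk len u₀ ret e v' := by
  have htop := henv.top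
  have hslots : ∀ w, w ∈ ws → w.hi ≤ (e.reg .rsp).toNat - 92 ∨ (e.reg .rsp).toNat + 24 ≤ w.lo :=
    fun w hw => (hW w hw).slots
  have hslot := slot_frame hs (e.reg .rsp).toNat htop hslots
  -- the struct at `c` is kept
  obtain ⟨B, hB, hin⟩ := h.pre.book.book
  have hok := h.pre.book.ok
  have hd1 : ∀ w, w ∈ ws → (Codebook.block (cOf e)).base + (Codebook.block (cOf e)).size ≤ w.lo ∨
      w.hi ≤ (Codebook.block (cOf e)).base := by
    intro w hw
    have := (hW w hw).book
    simp only [Off.sizeof.Codebook]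
    exact this
  have hkept : (Codebook.block (cOf e)).Kept v.mem v'.mem :=
    Block.Kept.of_sameExcept hs hd1 (Codebook.block_no_wrap hok hB hin)
  have hsf : Codebook.SameFields v.mem v'.mem (cOf e) := Codebook.SameFields.of_kept hkept
  have esv : Codebook.svBlock v.mem (cOf e) = Codebook.svBlock e.mem (cOf e) := by
    unfold Codebook.svBlock
    rw [h.book.sorted_values, h.book.sorted_entries]
  have hd2 : 1 ≤ Codebook.sorted_entries v.mem (cOf e) → ∀ w, w ∈ ws →
      (Codebook.svBlock v.mem (cOf e)).base + (Codebook.svBlock v.mem (cOf e)).size ≤ w.lo ∨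
        w.hi ≤ (Codebook.svBlock v.mem (cOf e)).base := by
    intro hse w hw
    rw [esv]
    rw [h.book.sorted_entries] at hse
    exact (hW w hw).sv hse
  -- the table and the two ints are kept
  have hkT : (Block.mk (outsOf e) (8 * chOf e)).Kept v.mem v'.mem := by
    apply Block.Kept.of_sameExcept hs
    · intro w hw
      exact (hW w hw).table
    · have := henv.table
      simp only []
      omega
  have hkC : (Block.mk (cpOf e) 4).Kept v.mem v'.mem := by
    apply Block.Kept.of_sameExcept hs
    · intro w hw
      exact (hW w hw).cp
    · have := henv.cp
      simp only []
      omega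
  have hkP : (Block.mk (ppOf e) 4).Kept v.mem v'.mem := by
    apply Block.Kept.of_sameExcept hs
    · intro w hw
      exact (hW w hw).pp
    · have := henv.pp
      simp only []
      omega
  -- `*f` is kept
  have hf := henv.f
  have hobj : ObjSame (fOf e) v.mem v'.mem := by
    apply ObjSame.of_sameExcept hs
    · simp only [Off.sizeof.stb_vorbis]
      omega
    · intro w hw
      have := (hW w hw).obj
      omega
  refine ⟨⟨h.mid.atEntry, hrsp, ?_, ?_, ?_, ?_, ?_, ?_, ?_, ?_, ?_, habi, ?_⟩, h.pre, ?_, ?_, ?_, ?_, ?_, hr12,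
    ?_, ?_, ?_, ?_, ?_, ?_, ?_, ?_, ?_⟩
  · rw [hslot _ 8 (by u_omega) (by u_omega)]
    exact h.mid.ra
  · rw [hslot _ 8 (by u_omega) (by u_omega)]
    exact h.mid.r15
  · rw [hslot _ 8 (by u_omega) (by u_omega)]
    exact h.mid.r14
  · rw [hslot _ 8 (by u_omega) (by u_omega)]
    exact h.mid.r13
  · rw [hslot _ 8 (by u_omega) (by u_omega)]
    exact h.mid.r12
  · rw [hslot _ 8 (by u_omega) (by u_omega)]
    exact h.mid.rbp
  · rw [hslot _ 8 (by u_omega) (by u_omega)]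
    exact h.mid.rbx
  · -- the footprint
    apply h.mid.same.step_same hs
    intro w hw a h1 h2
    obtain ⟨w', hw', k1, k2⟩ := (hW w hw).foot
    exact ⟨w', hw', by omega, by omega⟩
  · -- the text
    apply Mem.EqOn.step_same h.mid.code hs
    intro w hw
    have := (hW w hw).text
    have e1 : L.textLo = 0x100000 := rfl
    have e2 : L.textHi = 0x119d40 := rfl
    omega
  · -- the shadow
    apply Mem.EqOn.step_same h.mid.untouched hs
    intro w hw
    have := (hW w hw).shadow
    omega
  · -- `Bits f`, μ
    refine ⟨h.reader.bits.frame hobj, ?_⟩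
    rw [mu_transfer (hobj.sub (by decide))]
    exact h.reader.mu_le
  · exact h.cb.frame_sameExcept hok hB hin hs hd1 hd2
  · exact h.apart.frame hsf
  · exact sameFields_trans h.book hsf
  · rw [hsf.lookup_type]
    exact h.type2
  · rw [hslot _ 4 (by u_omega) (by u_omega)]
    exact h.chSlot
  · rw [hslot _ 8 (by u_omega) (by u_omega)]
    exact h.outsSlot
  · rw [hslot _ 8 (by u_omega) (by u_omega)]
    exact h.fSlot
  · rw [hslot _ 8 (by u_omega) (by u_omega)]
    exact h.cpSlot
  · rw [hslot _ 8 (by u_omega) (by u_omega)]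
    exact h.ppSlot
  · rw [hslot _ 4 (by u_omega) (by u_omega)]
    exact h.lenSlot
  · intro k hk
    have e1 := hkT.u64 (outsOf e + 8 * k) (by simp only []; omega) (by simp only []; omega)
    have e2 := h.table k hk
    simp only [Mem.ptr_eq] at e2 ⊢
    exact e1.trans e2
  · exact (hkC.i32 (cpOf e) (Nat.le_refl _) (Nat.le_refl _)).trans h.cInt
  · exact (hkP.i32 (ppOf e) (Nat.le_refl _) (Nat.le_refl _)).trans h.pInt

/-! ### The addresses and loads of the loop body, in the forms the walker leaves -/

/-- `movsxd` of a small non-negative number held in a register (`movsxd rax, ebp`) is the number. -/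
theorem sx_part (n : Nat) (h : n < 2 ^ 31) :
    Word.ofBV (BitVec.signExtend 64 (Word.part .w32 (UInt64.ofNat n))) = UInt64.ofNat n := by
  apply UInt64.toNat_inj.mp
  have e1 : (Word.part .w32 (UInt64.ofNat n)).toNat = n := by
    rw [Vorbis.toNat_part32, UInt64.toNat_ofNat']
    omega
  rw [toNat_sext32 _ (by omega), e1, UInt64.toNat_ofNat']
  omega

/-- `movsxd` of a small non-negative dword loaded from memory (`movsxd rdx, DWORD PTR [rsp+8]`) is the number. -/
theorem sx_ofNat (n : Nat) (h : n < 2 ^ 31) :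
    Word.ofBV (BitVec.signExtend 64 (BitVec.ofNat 32 n)) = UInt64.ofNat n := by
  apply UInt64.toNat_inj.mp
  have e1 : (BitVec.ofNat 32 n).toNat = n := toNat_ofNat32 n (by omega)
  rw [toNat_sext32 _ (by omega), e1, UInt64.toNat_ofNat']
  omega

/-- 10DD87H – 10DD93H `lea r14d, [r13+rax] ; movsxd r14, r14d ; shl r14, 2 ; add r14, [r12+20H]`: the address of
`multiplicands[z·dim + i]`. -/
theorem addr_mult (i zd M : Nat) (h : zd + i < 2 ^ 31) (hM : M + 4 * (zd + i) < 2 ^ 64) :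
    (Word.ofBV (BitVec.signExtend 64 (BitVec.setWidth 32 (UInt64.ofNat i + Word.ofBV (BitVec.ofNat 32 zd)).toBitVec)) <<< 2 +
      UInt64.ofNat M).toNat = M + 4 * (zd + i) := by
  have ex : (UInt64.ofNat i + Word.ofBV (BitVec.ofNat 32 zd)).toNat % 2 ^ 32 = zd + i := by
    rw [UInt64.toNat_add, UInt64.toNat_ofNat', Vorbis.toNat_ofBV32, BitVec.toNat_ofNat]
    omega
  have := sext32_shl2_add (UInt64.ofNat i + Word.ofBV (BitVec.ofNat 32 zd)) M (by omega) (by omega)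
  rw [ex] at this
  exact this

/-- 10DDADH – 10DDB5H `movsxd rax, ebp ; mov rcx, [rsp+10H] ; lea r14, [rcx+rax*8]`: the address of `outputs[c_inter]`. -/
theorem addr_table (outs : Word) (ci : Nat) (h : ci < 2 ^ 31) (hno : outs.toNat + 8 * ci < 2 ^ 64) :
    (outs + Word.ofBV (BitVec.signExtend 64 (Word.part .w32 (UInt64.ofNat ci))) * 8).toNat = outs.toNat + 8 * ci := by
  rw [sx_part ci h, UInt64.toNat_add, UInt64.toNat_mul, UInt64.toNat_ofNat']
  have e8 : (8 : UInt64).toNat = 8 := rfl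
  rw [e8]
  omega

/-- 10DDC9H – 10DDCEH `movsxd rdx, [rsp+8] ; lea r14, [rax+rdx*4]`: the address of `outputs[c_inter][p_inter]`. -/
theorem addr_float (P pi : Nat) (h : pi < 2 ^ 31) (hno : P + 4 * pi < 2 ^ 64) :
    (UInt64.ofNat P + Word.ofBV (BitVec.signExtend 64 (BitVec.ofNat 32 pi)) * 4).toNat = P + 4 * pi := by
  rw [sx_ofNat pi h, UInt64.toNat_add, UInt64.toNat_mul, UInt64.toNat_ofNat', UInt64.toNat_ofNat']
  have e4 : (4 : UInt64).toNat = 4 := rfl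
  rw [e4]
  omega

/-- The load `[r12 + 20H]` is the field `c->multiplicands`. -/
theorem read_mult (m : Mem) (c : Word) : m.readLE (c + 32) 8 = Codebook.multiplicands m c.toNat := by
  have h : addr (c.toNat + 32) = c + 32 := by
    rw [← addr_add_lit, addr_toNat]
  simp only [vacc, voff]
  unfold Mem.u64
  rw [h]

/-- The load `[outputs + c_inter*8]` is the pointer `outputs[c_inter]`. -/
theorem read_table (m : Mem) (outs : Word) (ci : Nat) (h : ci < 2 ^ 31) (hno : outs.toNat + 8 * ci < 2 ^ 64) :
    m.readLE (outs + Word.ofBV (BitVec.signExtend 64 (Word.part .w32 (UInt64.ofNat ci))) * 8) 8 =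
      m.ptr (outs.toNat + 8 * ci) := by
  have ha : addr (outs.toNat + 8 * ci) =
      outs + Word.ofBV (BitVec.signExtend 64 (Word.part .w32 (UInt64.ofNat ci))) * 8 := by
    apply UInt64.toNat_inj.mp
    rw [sx_part ci h, UInt64.toNat_add, UInt64.toNat_mul, UInt64.toNat_ofNat', toNat_addr _ hno]
    have e8 : (8 : UInt64).toNat = 8 := rfl
    rw [e8]
    omega
  rw [Mem.ptr_eq]
  unfold Mem.u64
  rw [ha]

/-! ### What the invariant gives the loop body -/

/-- K6 at the entry state: `N(c)·dimensions ≤ 1FFFFFFFH` as numbers, and every `multiplicands[j]`, `j < N(c)·dimensions`, is a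
check site. -/
theorem mult_site {others : List Obj} {frames : List (Nat × FrameLayout)} {Blk : Block → Prop} {len : Nat} {e : State}
    (hpre : DeintPre others frames Blk len e) (ht : Codebook.lookup_type e.mem (cOf e) = 2) :
    nOf e * dimOf e ≤ 0x1FFFFFFF ∧ ∀ j, j < nOf e * dimOf e →
      Site (Live (stackObjs frames ++ others)) (Codebook.multiplicands e.mem (cOf e) + 4 * j) 4 := by
  have hcb : CodebookOK Blk e.mem (cOf e) := hpre.book.cb
  have hL := hpre.book.reader.env.live
  have hN := hcb.N_nonneg
  have hd := hcb.K1.dim_pos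
  have hp := hcb.K6.prod_le ht
  have e1 : ((nOf e : Nat) : Int) = Codebook.N e.mem (cOf e) := Int.toNat_of_nonneg hN
  have e2 : ((dimOf e : Nat) : Int) = Codebook.dimensions e.mem (cOf e) := Int.toNat_of_nonneg (by omega)
  have e3 : ((nOf e * dimOf e : Nat) : Int) = Codebook.N e.mem (cOf e) * Codebook.dimensions e.mem (cOf e) := by
    rw [Int.natCast_mul, e1, e2]
  refine ⟨by omega, ?_⟩
  intro j hj
  obtain ⟨sz, hsz, hblk⟩ := hcb.K6.mults ht
  have hsz' : 4 * (nOf e * dimOf e) ≤ sz := hsz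
  refine Site.of_blk hL hblk ?_ ?_ (by decide)
  · simp only []
    omega
  · simp only []
    omega

/-- The bounds of the loop body (no 32-bit operation of the body wraps): `c_inter < ch ≤ 16`, `p_inter ≤ len ≤ 4096`,
`i ≤ effective ≤ 65535`, and while an element is left (`i < effective`) `p_inter < len`. -/
theorem body_bounds {others : List Obj} {frames : List (Nat × FrameLayout)} {Blk : Block → Prop} {len : Nat} {e : State}
    (hpre : DeintPre others frames Blk len e) {ci0 pi0 eff zd ci pi i pos0 : Nat} {td : Int}
    (hround : Round e ci0 pi0 eff zd td) (hinner : Res.DeintInner ci pi (chOf e) (lenOf e) pos0 eff i) :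
    ci < chOf e ∧ chOf e ≤ 16 ∧ lenOf e ≤ 4096 ∧ pi ≤ lenOf e ∧ i ≤ eff ∧ eff ≤ 65535 ∧ (i < eff → pi < lenOf e) := by
  have hcb : CodebookOK Blk e.mem (cOf e) := hpre.book.cb
  have hdl := hcb.K1.dim_le
  have hel := hround.eff_le
  have h1 := hinner.c_lt
  have h2 := hinner.pos_eq
  have h3 := hinner.i_le
  have h4 := hinner.room
  have hch : chOf e ≤ 16 := hpre.ch_le
  have hlen : lenOf e ≤ 4096 := hpre.len_le
  refine ⟨h1, hch, hlen, ?_, h3, ?_, ?_⟩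
  · have : pi * chOf e ≤ lenOf e * chOf e := by omega
    exact Nat.le_of_mul_le_mul_right this (by omega)
  · have : ((dimOf e : Nat) : Int) = Codebook.dimensions e.mem (cOf e) := Int.toNat_of_nonneg (by have := hcb.K1.dim_pos; omega)
    omega
  · intro hi
    exact (hinner.store_ok hi).2

/-- The signed value of a small number held in the low half of a register (the operands of `cmp r13d, r15d`). -/
theorem part32_toInt_small (n : Nat) (h : n < 2 ^ 31) : (Word.part .w32 (UInt64.ofNat n)).toInt = (n : Int) := by
  have e1 : (Word.part .w32 (UInt64.ofNat n)).toNat = n := by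
    rw [Vorbis.toNat_part32, UInt64.toNat_ofNat']
    omega
  rw [toInt_of_lt _ (by omega), e1]

/-- `add DWORD PTR [m], 1` of a small number, as a number. -/
theorem incmem32_toNat (n : Nat) (h : n + 1 < 2 ^ 32) : (BitVec.ofNat 32 n + 1#32).toNat = n + 1 := by
  rw [BitVec.toNat_add, BitVec.toNat_ofNat]
  have e1 : (1#32).toNat = 1 := by decide
  rw [e1]
  omega

/-! ### The back edge -/

/-- `add r32, 1` of a small number held in a register, as a number. -/
theorem incReg32_toNat (n : Nat) (h : n + 1 < 2 ^ 32) : (Word.part .w32 (UInt64.ofNat n) + 1#32).toNat = n + 1 := by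
  rw [BitVec.toNat_add, Vorbis.toNat_part32, UInt64.toNat_ofNat']
  have e1 : (1#32).toNat = 1 := by decide
  rw [e1]
  simp only [Width.bits]
  omega

/-- `add r32, 1` of a small number held in a register: the register holds the successor. -/
theorem incReg32 (n : Nat) (h : n + 1 < 2 ^ 32) : Word.ofBV (Word.part .w32 (UInt64.ofNat n) + 1#32) = UInt64.ofNat (n + 1) := by
  apply UInt64.toNat_inj.mp
  rw [Vorbis.toNat_ofBV32, incReg32_toNat n h, UInt64.toNat_ofNat']
  omega

/-- **The back edge of loop 1946**: one element done (`i < effective`), the position advanced (`if (++c_inter == ch)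
{ c_inter = 0; ++p_inter; }`), `++i`; the memory changed only inside windows that are `WinOff`. The invariant holds again and the
measure `effective − i` went down. -/
theorem loop_next {others : List Obj} {frames : List (Nat × FrameLayout)} {Blk : Block → Prop} {len : Nat} {u₀ : State}
    {ret : Word} {e u s : State} {eff zd pos0 ci pi i : Nat} {td : Int}
    (hinv : LoopInv others frames Blk len u₀ ret e eff zd td pos0 ci pi i u) (henv : DeintEnv e)
    (he_room : 0x700000 + 496 ≤ (e.reg .rsp).toNat) (hlt : i < eff) (heff : eff ≤ 65535) {ws : List Span}
    (hs : Mem.SameExcept ws u.mem s.mem) (hW : ∀ w, w ∈ ws → WinOff others frames Blk len e w)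
    (hrsp : s.reg .rsp = e.reg .rsp - 104) (hr12 : s.reg .r12 = e.reg .rsi) (habi : abiInv s)
    (hr13 : s.reg .r13 = Word.ofBV (Word.part .w32 (UInt64.ofNat i) + 1#32)) (hr15 : s.reg .r15 = UInt64.ofNat eff)
    (ci2 pi2 : Nat) (hci2 : ci2 = if ci + 1 = chOf e then 0 else ci + 1)
    (hpi2 : pi2 = if ci + 1 = chOf e then pi + 1 else pi) (hrbp : s.reg .rbp = UInt64.ofNat ci2)
    (hpi : s.mem.readLE (e.reg .rsp - 96) 4 = pi2) (hzd : s.mem.readLE (e.reg .rsp - 100) 4 = zd) :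
    LoopInv others frames Blk len u₀ ret e eff zd td pos0 ci2 pi2 (i + 1) s ∧
      eff - (s.reg .r13).toNat < eff - (UInt64.ofNat i).toNat := by
  have htop := henv.top
  have hslots : ∀ w, w ∈ ws → w.hi ≤ (e.reg .rsp).toNat - 92 ∨ (e.reg .rsp).toNat + 24 ≤ w.lo :=
    fun w hw => (hW w hw).slots
  have hslot := slot_frame hs (e.reg .rsp).toNat htop hslots
  have e13 := incReg32 i (by omega)
  refine ⟨⟨common_frame hinv.common henv he_room hs hW hrsp hr12 habi, ⟨hrbp, hpi, hr15, ?_⟩, hzd, ?_, ?_⟩, ?_⟩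
  · rw [hslot _ 4 (by u_omega) (by u_omega)]
    exact hinv.locals.tdSlot
  · rw [hr13, e13]
  · subst hci2 hpi2
    exact hinv.inner.step hlt
  · rw [hr13, e13, UInt64.toNat_ofNat', UInt64.toNat_ofNat']
    omega

end Vorbis.Spec.codebook_decode_deinterleave_repeat_4
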